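-- pv_equiv track=rewrite | github.com/apache/incubator | tools/seealso/seealso.py | format_grouped_line
-- ===== SOURCE A (Python) =====
-- TYPE_PRIORITY = {
--     "guide": 0,
--     "scenario": 1,
--     "slide": 2,
--     "video": 3,
--     "quiz": 4,
-- }
--
-- TYPE_LABELS = {
--     "guide": "Guide",
--     "scenario": "Scenario",
--     "slide": "Slide Deck",
--     "video": "Video",
--     "quiz": "Quiz",
-- }
--
-- def format_grouped_line(title, resources_in_group):
--     """
--     Format a group of resources that share the same title into a single Markdown line:
--
--         [Title](primary-url) - Description. [Slide Deck](...) [Video](...) [Quiz](...)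
--
--     Primary is usually the guide; extras become [Type] links.
--     """
--     if not resources_in_group:
--         return ""
--
--     # Pick primary resource (typically the guide) based on type priority, then title
--     primary = sorted(
--         resources_in_group,
--         key=lambda r: (
--             TYPE_PRIORITY.get(r.get("type", "guide"), 99),
--             (r.get("title") or "").lower()
--         )
--     )[0]
--
--     primary_url = (primary.get("url") or "").strip()
--     desc = (primary.get("description") or "").strip()
--
--     # If primary has no description, fall back to the first non-empty one in the group
--     if not desc:
--         for r in resources_in_group:
--             d = (r.get("description") or "").strip()
--             if d:
--                 desc = d
--                 break
--
--     clean_title = (title or "").strip() or "Untitled"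
--
--     # First part: main link
--     if primary_url:
--         line = f"[{clean_title}]({primary_url})"
--     else:
--         line = clean_title
--
--     if desc:
--         line = f"{line} - {desc}"
--
--     # Extra links for the rest of the group
--     extras = [r for r in resources_in_group if r is not primary]
--
--     if extras:
--         extras_sorted = sorted(
--             extras,
--             key=lambda r: (
--                 TYPE_PRIORITY.get(r.get("type", "guide"), 99),
--                 (r.get("title") or "").lower()
--             )
--         )
--         extra_parts = []
--         for r in extras_sorted:
--             r_type = (r.get("type") or "guide").lower()
--             label = TYPE_LABELS.get(r_type, r_type.capitalize())
--             url = (r.get("url") or "").strip()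
--             if url:
--                 extra_parts.append(f"[{label}]({url})")
--             else:
--                 extra_parts.append(label)
--         if extra_parts:
--             line = f"{line} " + " ".join(extra_parts)
--
--     return line
-- ===== SOURCE B (Python) =====
-- TYPE_PRIORITY = {
--     "guide": 0,
--     "scenario": 1,
--     "slide": 2,
--     "video": 3,
--     "quiz": 4,
-- }
--
-- TYPE_LABELS = {
--     "guide": "Guide",
--     "scenario": "Scenario",
--     "slide": "Slide Deck",
--     "video": "Video",
--     "quiz": "Quiz",
-- }
--
-- # Every value TYPE_PRIORITY.get(..., 99) can take, in ascending order.
-- PRIORITIES = (0, 1, 2, 3, 4, 99)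
--
--
-- def _title_key(r):
--     return (r.get("title") or "").lower()
--
--
-- def _extra_part(r):
--     r_type = (r.get("type") or "guide").lower()
--     label = TYPE_LABELS.get(r_type, r_type.capitalize())
--     url = (r.get("url") or "").strip()
--     return f"[{label}]({url})" if url else label
--
--
-- def _bucket_sorted(resources):
--     # Distribution (bucket) sort: one bucket per type priority, each bucket
--     # stably ordered by lowercased title; concatenating the buckets in
--     # priority order yields the group sorted by (priority, title).
--     ordered = []
--     for p in PRIORITIES:
--         bucket = [r for r in resources
--                   if TYPE_PRIORITY.get(r.get("type", "guide"), 99) == p]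
--         ordered += sorted(bucket, key=_title_key)
--     return ordered
--
--
-- def format_grouped_line(title, resources_in_group):
--     if not resources_in_group:
--         return ""
--
--     ordered = _bucket_sorted(resources_in_group)
--     primary = ordered[0]
--     url = (primary.get("url") or "").strip()
--     desc = (primary.get("description") or "").strip() or next(
--         (d for d in ((r.get("description") or "").strip()
--                      for r in resources_in_group) if d), "")
--
--     clean_title = (title or "").strip() or "Untitled"
--     line = f"[{clean_title}]({url})" if url else clean_title
--     if desc:
--         line = f"{line} - {desc}"
--
--     # Extras: drop the primary OBJECT only (identity, not equality), so a
--     # duplicate equal dict elsewhere in the group still shows up.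
--     parts = [_extra_part(r) for r in ordered if r is not primary]
--     if parts:
--         line = f"{line} " + " ".join(parts)
--     return line
-- ===== Notes on version B (the rewrite author's own statement) =====
-- stated objective: alternative
-- what changed: B replaces A's two comparison sorts by tuple key with a distribution (bucket) sort: one pass per type-priority value collects its bucket, each bucket is stably ordered by lowercased title alone, and the buckets concatenated in priority order give the full order once; the primary is the head and the extras are the identity-filtered rest of that same bucketed list, and the description fallback becomes a generator/next expression.
import Mathlib
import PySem

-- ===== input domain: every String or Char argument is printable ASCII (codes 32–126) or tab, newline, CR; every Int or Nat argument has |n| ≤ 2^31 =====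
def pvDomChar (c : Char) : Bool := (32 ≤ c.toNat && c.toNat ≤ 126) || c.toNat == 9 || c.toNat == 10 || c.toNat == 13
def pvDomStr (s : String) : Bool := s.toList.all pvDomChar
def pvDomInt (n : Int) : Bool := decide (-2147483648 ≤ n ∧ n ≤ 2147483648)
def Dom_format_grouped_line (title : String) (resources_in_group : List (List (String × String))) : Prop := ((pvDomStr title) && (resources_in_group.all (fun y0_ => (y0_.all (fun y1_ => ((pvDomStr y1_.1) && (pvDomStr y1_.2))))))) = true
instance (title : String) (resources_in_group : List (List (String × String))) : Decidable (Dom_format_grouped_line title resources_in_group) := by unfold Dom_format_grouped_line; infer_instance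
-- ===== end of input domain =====

-- B replaces A's two tuple-key sorts with a distribution (bucket) sort over the six type
-- priorities, each bucket title-sorted, buckets concatenated once; objective: alternative.
-- Python dict identity ('r is not primary') is modelled by enumerating the group, so equal
-- dicts at different positions stay distinct (as the distinct objects they are in Python).

-- ===== PORT A =====
-- shared module constants / shared code fragments of the two Pythons

-- TYPE_PRIORITY.get(t, 99)
def pvPrio (t : String) : Int :=
  if t = "guide" then 0 else if t = "scenario" then 1 else if t = "slide" then 2
  else if t = "video" then 3 else if t = "quiz" then 4 else 99

-- TYPE_PRIORITY.get(r.get("type", "guide"), 99)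
def pvK1 (r : List (String × String)) : Int :=
  pvPrio ((PySem.Dict.ofList r).getD "type" "guide")

-- (r.get("title") or "").lower()
def pvK2 (r : List (String × String)) : String :=
  PySem.Str.lower ((PySem.Dict.ofList r).getD "title" "")

-- A's description-fallback loop: first non-empty stripped description, else ""
def pvDescLoop : List (List (String × String)) → String
  | [] => ""
  | r :: t =>
      let d := PySem.Str.strip ((PySem.Dict.ofList r).getD "description" "")
      if d = "" then pvDescLoop t else d

-- str.capitalize(), ported by hand: exact on the ASCII domain (first char upper, rest lower)
def pvCapitalize (s : String) : String :=
  match s.toList with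
  | [] => s
  | c :: t => String.ofList (PySem.Chars.upper [c] ++ PySem.Chars.lower t)

-- label = TYPE_LABELS.get(r_type, r_type.capitalize()) with r_type = (r.get("type") or "guide").lower()
def pvLabel (r : List (String × String)) : String :=
  let t0 := (PySem.Dict.ofList r).getD "type" ""
  let rt := PySem.Str.lower (if t0 = "" then "guide" else t0)
  if rt = "guide" then "Guide" else if rt = "scenario" then "Scenario"
  else if rt = "slide" then "Slide Deck" else if rt = "video" then "Video"
  else if rt = "quiz" then "Quiz" else pvCapitalize rt

-- one extra link: "[label](url)" if url else label
def pvPart (r : List (String × String)) : String :=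
  let url := PySem.Str.strip ((PySem.Dict.ofList r).getD "url" "")
  if url = "" then pvLabel r else "[" ++ pvLabel r ++ "](" ++ url ++ ")"

def format_grouped_line (title : String) (resources_in_group : List (List (String × String))) : String :=
  if resources_in_group = [] then "" else
  let en := PySem.List.enumerate resources_in_group 0
  let primary := (PySem.List.sorted2 en (fun p => pvK1 p.2) (fun p => pvK2 p.2)).headD (0, [])
  let primary_url := PySem.Str.strip ((PySem.Dict.ofList primary.2).getD "url" "")
  let desc0 := PySem.Str.strip ((PySem.Dict.ofList primary.2).getD "description" "")
  let desc := if desc0 = "" then pvDescLoop resources_in_group else desc0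
  let clean_title := if PySem.Str.strip title = "" then "Untitled" else PySem.Str.strip title
  let line0 := if primary_url = "" then clean_title else "[" ++ clean_title ++ "](" ++ primary_url ++ ")"
  let line1 := if desc = "" then line0 else line0 ++ " - " ++ desc
  let extras := en.filter (fun p => decide (p.1 ≠ primary.1))   -- 'r is not primary'
  if extras = [] then line1 else
    let extras_sorted := PySem.List.sorted2 extras (fun p => pvK1 p.2) (fun p => pvK2 p.2)
    let extra_parts := extras_sorted.foldl (fun acc p => acc ++ [pvPart p.2]) []
    if extra_parts = [] then line1 else line1 ++ " " ++ PySem.Str.join " " extra_parts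

-- ===== PORT B =====
-- B's bucket loop: for p in PRIORITIES: ordered += sorted(bucket(p), key=title)
-- (run on the enumerated pairs, so equal dicts at different positions stay distinct)
def pvBucketSorted (en : List (Int × List (String × String))) : List (Int × List (String × String)) :=
  ([0, 1, 2, 3, 4, 99] : List Int).foldl
    (fun acc p => acc ++ PySem.List.sorted (en.filter (fun y => pvK1 y.2 == p)) (fun y => pvK2 y.2)) []

-- B's description fallback: next((d for d in (strip(...) for r in rs) if d), "")
def pvDescFind (rs : List (List (String × String))) : String :=
  (rs.findSome? (fun r =>
    let d := PySem.Str.strip ((PySem.Dict.ofList r).getD "description" "")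
    if d = "" then none else some d)).getD ""

def format_grouped_line_alt (title : String) (resources_in_group : List (List (String × String))) : String :=
  if resources_in_group = [] then "" else
  let en := PySem.List.enumerate resources_in_group 0
  let ordered := pvBucketSorted en
  let primary := ordered.headD (0, [])
  let url := PySem.Str.strip ((PySem.Dict.ofList primary.2).getD "url" "")
  let desc0 := PySem.Str.strip ((PySem.Dict.ofList primary.2).getD "description" "")
  let desc := if desc0 = "" then pvDescFind resources_in_group else desc0
  let clean_title := if PySem.Str.strip title = "" then "Untitled" else PySem.Str.strip title
  let line0 := if url = "" then clean_title else "[" ++ clean_title ++ "](" ++ url ++ ")"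
  let line1 := if desc = "" then line0 else line0 ++ " - " ++ desc
  let parts := (ordered.filter (fun p => decide (p.1 ≠ primary.1))).map (fun p => pvPart p.2)
  if parts = [] then line1 else line1 ++ " " ++ PySem.Str.join " " parts

-- ===== PRECONDITION & SPEC =====
def Spec_format_grouped_line (title : String) (resources_in_group : List (List (String × String))) (out : String) : Prop := out = format_grouped_line_alt title resources_in_group
instance (title : String) (resources_in_group : List (List (String × String))) (out : String) : Decidable (Spec_format_grouped_line title resources_in_group out) := by unfold Spec_format_grouped_line; infer_instance

-- ===== CLAIM (what is proved, stated in full; the proofs are below) =====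
def Claim_equal_format_grouped_line : Prop := ∀ (title : String) (resources_in_group : List (List (String × String))), Dom_format_grouped_line title resources_in_group → Spec_format_grouped_line title resources_in_group (format_grouped_line title resources_in_group)

-- ===== LEMMAS AND PROOFS =====

-- the Bool comparator sorted2 uses for a tuple key (k1 x, k2 x), reverse = false
def pvLt {α : Type} (k1 : α → Int) (k2 : α → String) (a b : α) : Bool :=
  decide (k1 a < k1 b) || (!decide (k1 b < k1 a) && decide (k2 a < k2 b))

theorem pvLt_iff {α : Type} (k1 : α → Int) (k2 : α → String) (a b : α) :
    pvLt k1 k2 a b = true ↔ (k1 a < k1 b ∨ (¬ k1 b < k1 a ∧ k2 a < k2 b)) := by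
  simp [pvLt]

theorem pvLt_asymm {α : Type} (k1 : α → Int) (k2 : α → String) {a b : α}
    (h : pvLt k1 k2 a b = true) : pvLt k1 k2 b a = false := by
  rw [pvLt_iff] at h
  rw [Bool.eq_false_iff, Ne, pvLt_iff]
  rcases h with h | ⟨h1, h2⟩
  · rintro (h' | ⟨h1', _⟩) <;> [exact absurd h (lt_asymm h'); exact h1' h]
  · rintro (h' | ⟨_, h2'⟩) <;> [exact h1 h'; exact absurd h2 (lt_asymm h2')]

theorem pvLt_trans {α : Type} (k1 : α → Int) (k2 : α → String) {a b c : α}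
    (hab : pvLt k1 k2 a b = true) (hbc : pvLt k1 k2 b c = true) : pvLt k1 k2 a c = true := by
  rw [pvLt_iff] at hab hbc ⊢
  rcases hab with h | ⟨h1, h2⟩ <;> rcases hbc with h' | ⟨h1', h2'⟩
  · exact Or.inl (lt_trans h h')
  · exact Or.inl (lt_of_lt_of_le h (not_lt.1 h1'))
  · exact Or.inl (lt_of_le_of_lt (not_lt.1 h1) h')
  · exact Or.inr ⟨fun hc => h1 (lt_of_le_of_lt (not_lt.1 h1') hc), lt_trans h2 h2'⟩

-- x < y together with ¬(z < y) gives x < z (negative transitivity of the strict weak order)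
theorem pvLt_of_lt_of_not_lt {α : Type} (k1 : α → Int) (k2 : α → String) {x y z : α}
    (hxy : pvLt k1 k2 x y = true) (hzy : pvLt k1 k2 z y = false) : pvLt k1 k2 x z = true := by
  rw [pvLt_iff] at hxy ⊢
  rw [Bool.eq_false_iff, Ne, pvLt_iff] at hzy
  push_neg at hzy
  obtain ⟨hzy1, hzy2⟩ := hzy
  have hyz : k1 y ≤ k1 z := hzy1
  rcases hxy with h | ⟨h1, h2⟩
  · exact Or.inl (lt_of_lt_of_le h hyz)
  · by_cases hcase : k1 y < k1 z
    · exact Or.inl (lt_of_le_of_lt (not_lt.1 h1) hcase)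
    · exact Or.inr ⟨fun hc => h1 (lt_of_le_of_lt hyz hc), lt_of_lt_of_le h2 (hzy2 (not_lt.1 hcase))⟩

theorem insertBy_pvLt_head {α : Type} (k1 : α → Int) (k2 : α → String) (x : α) (l : List α)
    (h : ∀ z ∈ l, pvLt k1 k2 x z = true) :
    PySem.List.insertBy (pvLt k1 k2) x l = x :: l := by
  cases l with
  | nil => rfl
  | cons y t => simp [PySem.List.insertBy, h y (List.mem_cons_self ..)]

theorem pairwise_insertBy {α : Type} (k1 : α → Int) (k2 : α → String) (x : α) (ys : List α)
    (h : ys.Pairwise (fun a b => pvLt k1 k2 b a = false)) :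
    (PySem.List.insertBy (pvLt k1 k2) x ys).Pairwise (fun a b => pvLt k1 k2 b a = false) := by
  induction ys with
  | nil => simp [PySem.List.insertBy]
  | cons y t ih =>
    rcases List.pairwise_cons.1 h with ⟨hy, ht⟩
    by_cases hxy : pvLt k1 k2 x y = true
    · rw [PySem.List.insertBy, if_pos hxy]
      refine List.pairwise_cons.2 ⟨?_, h⟩
      intro z hz
      rcases List.mem_cons.1 hz with rfl | hzt
      · exact pvLt_asymm k1 k2 hxy
      · by_contra hc
        rw [Bool.not_eq_false] at hc
        exact absurd (pvLt_trans k1 k2 hc hxy) (by rw [hy z hzt]; simp)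
    · rw [PySem.List.insertBy, if_neg hxy]
      refine List.pairwise_cons.2 ⟨?_, ih ht⟩
      intro z hz
      rcases (PySem.List.mem_insertBy _ x z t).1 hz with rfl | hzt
      · exact Bool.eq_false_iff.2 hxy
      · exact hy z hzt

theorem filter_insertBy_pos {α : Type} (k1 : α → Int) (k2 : α → String) (p : α → Bool) (x : α)
    (ys : List α) (hx : p x = true) (hs : ys.Pairwise (fun a b => pvLt k1 k2 b a = false)) :
    (PySem.List.insertBy (pvLt k1 k2) x ys).filter p
      = PySem.List.insertBy (pvLt k1 k2) x (ys.filter p) := by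
  induction ys with
  | nil => simp [PySem.List.insertBy, hx]
  | cons y t ih =>
    rcases List.pairwise_cons.1 hs with ⟨hy, ht⟩
    by_cases hxy : pvLt k1 k2 x y = true
    · rw [PySem.List.insertBy, if_pos hxy]
      by_cases hpy : p y = true
      · simp only [List.filter_cons, hx, hpy, if_true]
        rw [PySem.List.insertBy, if_pos hxy]
      · simp only [List.filter_cons, hx, hpy, if_true, if_false, Bool.false_eq_true]
        rw [insertBy_pvLt_head k1 k2 x (t.filter p)]
        intro z hz
        exact pvLt_of_lt_of_not_lt k1 k2 hxy (hy z (List.mem_of_mem_filter hz))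
    · rw [PySem.List.insertBy, if_neg hxy]
      by_cases hpy : p y = true
      · simp only [List.filter_cons, hpy, if_true]
        rw [ih ht, PySem.List.insertBy, if_neg hxy]
      · simp only [List.filter_cons, hpy, if_false, Bool.false_eq_true]
        exact ih ht

theorem filter_insertBy_neg {α : Type} (k1 : α → Int) (k2 : α → String) (p : α → Bool) (x : α)
    (ys : List α) (hx : p x = false) :
    (PySem.List.insertBy (pvLt k1 k2) x ys).filter p = ys.filter p := by
  induction ys with
  | nil => simp [PySem.List.insertBy, hx]
  | cons y t ih =>
    by_cases hxy : pvLt k1 k2 x y = true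
    · rw [PySem.List.insertBy, if_pos hxy]
      simp [List.filter_cons, hx]
    · rw [PySem.List.insertBy, if_neg hxy]
      simp only [List.filter_cons]
      rw [ih]

theorem foldl_insertBy_filter {α : Type} (k1 : α → Int) (k2 : α → String) (p : α → Bool)
    (xs : List α) (acc : List α) (hs : acc.Pairwise (fun a b => pvLt k1 k2 b a = false)) :
    (xs.foldl (fun l x => PySem.List.insertBy (pvLt k1 k2) x l) acc).filter p
      = (xs.filter p).foldl (fun l x => PySem.List.insertBy (pvLt k1 k2) x l) (acc.filter p) := by
  induction xs generalizing acc with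
  | nil => simp
  | cons x t ih =>
    simp only [List.foldl_cons, List.filter_cons]
    by_cases hx : p x = true
    · rw [hx, if_pos rfl, List.foldl_cons,
        ih _ (pairwise_insertBy k1 k2 x acc hs), filter_insertBy_pos k1 k2 p x acc hx hs]
    · rw [Bool.not_eq_true] at hx
      rw [hx]
      simp only [Bool.false_eq_true, if_false]
      rw [ih _ (pairwise_insertBy k1 k2 x acc hs), filter_insertBy_neg k1 k2 p x acc hx]

theorem sorted2_eq_foldl {α : Type} (xs : List α) (k1 : α → Int) (k2 : α → String) :
    PySem.List.sorted2 xs k1 k2 = xs.foldl (fun l x => PySem.List.insertBy (pvLt k1 k2) x l) [] := rfl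

-- stable sorting commutes with filtering
theorem sorted2_filter {α : Type} (xs : List α) (k1 : α → Int) (k2 : α → String) (p : α → Bool) :
    PySem.List.sorted2 (xs.filter p) k1 k2 = (PySem.List.sorted2 xs k1 k2).filter p := by
  rw [sorted2_eq_foldl, sorted2_eq_foldl,
    foldl_insertBy_filter k1 k2 p xs [] (List.Pairwise.nil), List.filter_nil]

-- inserting below everything it is not-before: the prefix is skipped
theorem insertBy_append_of_not {α : Type} (lt : α → α → Bool) (x : α) (A R : List α)
    (h : ∀ a ∈ A, lt x a = false) :
    PySem.List.insertBy lt x (A ++ R) = A ++ PySem.List.insertBy lt x R := by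
  induction A with
  | nil => rfl
  | cons a t ih =>
    rw [List.cons_append, PySem.List.insertBy, if_neg (by simp [h a (List.mem_cons_self ..)]),
      List.cons_append, ih (fun b hb => h b (List.mem_cons_of_mem a hb))]

-- inserting before everything in the suffix: the suffix is untouched
theorem insertBy_append_of_all {α : Type} (lt : α → α → Bool) (x : α) (B C : List α)
    (h : ∀ c ∈ C, lt x c = true) :
    PySem.List.insertBy lt x (B ++ C) = PySem.List.insertBy lt x B ++ C := by
  induction B with
  | nil =>
    cases C with
    | nil => rfl
    | cons c t => simp [PySem.List.insertBy, h c (List.mem_cons_self ..)]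
  | cons b t ih =>
    by_cases hb : lt x b = true
    · rw [List.cons_append, PySem.List.insertBy, if_pos hb, PySem.List.insertBy, if_pos hb]
      simp
    · rw [List.cons_append, PySem.List.insertBy, if_neg hb, PySem.List.insertBy, if_neg hb,
        List.cons_append, ih]

-- insertBy only compares x against list elements
theorem insertBy_congr {α : Type} (lt1 lt2 : α → α → Bool) (x : α) (l : List α)
    (h : ∀ y ∈ l, lt1 x y = lt2 x y) :
    PySem.List.insertBy lt1 x l = PySem.List.insertBy lt2 x l := by
  induction l with
  | nil => rfl
  | cons y t ih =>
    rw [PySem.List.insertBy, PySem.List.insertBy, h y (List.mem_cons_self ..),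
      ih (fun b hb => h b (List.mem_cons_of_mem y hb))]

-- inserting into a concatenation of buckets keyed by k1 touches only x's bucket
theorem insertBy_flatMap {α : Type} (k1 : α → Int) (k2 : α → String) (x : α) (P : List Int)
    (S : Int → List α) (hS : ∀ p ∈ P, ∀ y ∈ S p, k1 y = p)
    (hP : P.Pairwise (· < ·)) (hx : k1 x ∈ P) :
    PySem.List.insertBy (pvLt k1 k2) x (P.flatMap S)
      = P.flatMap (fun p => if p = k1 x then PySem.List.insertBy (pvLt k1 k2) x (S p) else S p) := by
  induction P with
  | nil => cases hx
  | cons p P' ih =>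
    rcases List.pairwise_cons.1 hP with ⟨hlt, hP'⟩
    rw [List.flatMap_cons, List.flatMap_cons]
    by_cases hpx : p = k1 x
    · rw [if_pos hpx]
      rw [insertBy_append_of_all (pvLt k1 k2) x (S p) (P'.flatMap S) ?_]
      · congr 1
        refine (List.flatMap_congr ?_).symm
        intro q hq
        rw [if_neg (by rintro rfl; exact lt_irrefl _ (hpx ▸ hlt _ hq))]
      · intro c hc
        rcases List.mem_flatMap.1 hc with ⟨q, hq, hcq⟩
        have hc1 : k1 c = q := hS q (List.mem_cons_of_mem p hq) c hcq
        rw [pvLt_iff]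
        exact Or.inl (by rw [hc1, ← hpx]; exact hlt q hq)
    · have hx' : k1 x ∈ P' := by
        rcases List.mem_cons.1 hx with h | h
        · exact absurd h.symm hpx
        · exact h
      rw [if_neg hpx]
      rw [insertBy_append_of_not (pvLt k1 k2) x (S p) (P'.flatMap S) ?_]
      · rw [ih (fun q hq => hS q (List.mem_cons_of_mem p hq)) hP' hx']
      · intro a ha
        have ha1 : k1 a = p := hS p (List.mem_cons_self ..) a ha
        have hpa : p < k1 x := hlt _ hx'
        rw [Bool.eq_false_iff, Ne, pvLt_iff]
        rintro (h | ⟨h1, _⟩)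
        · exact absurd (ha1 ▸ h) (lt_asymm hpa)
        · exact h1 (ha1 ▸ hpa)

-- membership in the insertion-sort foldl
theorem pv_mem_sorted_foldl {α κ : Type} [LT κ] [DecidableLT κ] (y : α)
    (zs : List α) {key : α → κ} :
    y ∈ zs.foldl (fun acc x => PySem.List.insertBy (fun a b => decide (key a < key b)) x acc) []
      ↔ y ∈ zs := by
  rw [← PySem.List.sorted_eq_foldl_insertBy]
  exact PySem.List.mem_sorted zs key false y

-- the sorted2 order IS the bucket order: partition by k1 into the ascending priority
-- list P, stably sort each bucket by k2, concatenate
theorem sorted2_eq_buckets {α : Type} (k1 : α → Int) (k2 : α → String) (P : List Int)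
    (hP : P.Pairwise (· < ·)) (hall : ∀ x : α, k1 x ∈ P) (xs : List α) :
    PySem.List.sorted2 xs k1 k2
      = P.flatMap (fun p => PySem.List.sorted (xs.filter (fun y => k1 y == p)) (fun y => k2 y)) := by
  induction xs using List.reverseRecOn with
  | nil => simp [sorted2_eq_foldl, PySem.List.sorted_eq_foldl_insertBy]
  | append_singleton l x ih =>
    have hstep : PySem.List.sorted2 (l ++ [x]) k1 k2
        = PySem.List.insertBy (pvLt k1 k2) x (PySem.List.sorted2 l k1 k2) := by
      rw [sorted2_eq_foldl, sorted2_eq_foldl, List.foldl_append, List.foldl_cons, List.foldl_nil]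
    rw [hstep, ih]
    rw [insertBy_flatMap k1 k2 x P _ ?_ hP (hall x)]
    · refine List.flatMap_congr ?_
      intro p _
      by_cases hpx : p = k1 x
      · rw [if_pos hpx, List.filter_append]
        have hfx : [x].filter (fun y => k1 y == p) = [x] := by
          simp [List.filter_cons, hpx]
        rw [hfx, PySem.List.sorted_eq_foldl_insertBy, PySem.List.sorted_eq_foldl_insertBy,
          List.foldl_append, List.foldl_cons, List.foldl_nil]
        refine (insertBy_congr _ _ x _ ?_).symm
        intro y hy
        have hy1 : k1 y = p := by
          have := List.of_mem_filter (p := fun y => k1 y == p)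
            ((pv_mem_sorted_foldl y _).1 hy)
          exact by simpa using this
        simp [pvLt, hy1, hpx]
      · rw [if_neg hpx, List.filter_append]
        have hfx : [x].filter (fun y => k1 y == p) = ([] : List α) := by
          simp
          exact fun h => absurd h.symm hpx
        rw [hfx, List.append_nil]
    · intro p hp y hy
      rw [PySem.List.mem_sorted] at hy
      simpa using List.of_mem_filter hy

-- B's generator-based fallback computes A's loop
theorem descFind_eq_loop (rs : List (List (String × String))) :
    pvDescFind rs = pvDescLoop rs := by
  induction rs with
  | nil => rfl
  | cons r t ih =>
    unfold pvDescFind pvDescLoop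
    rw [List.findSome?_cons]
    by_cases hd : PySem.Str.strip ((PySem.Dict.ofList r).getD "description" "") = ""
    · rw [if_pos hd, if_pos hd, ← ih]
      rfl
    · rw [if_neg hd, if_neg hd]
      rfl

-- B's priority list covers every value pvK1 can take
theorem pvK1_mem (x : Int × List (String × String)) :
    pvK1 x.2 ∈ ([0, 1, 2, 3, 4, 99] : List Int) := by
  unfold pvK1 pvPrio
  split_ifs <;> simp

-- B's ordered list (priority loop of title-sorted buckets) is A's tuple-key sort
theorem ordered_eq_sorted2 (en : List (Int × List (String × String))) :
    pvBucketSorted en = PySem.List.sorted2 en (fun p => pvK1 p.2) (fun p => pvK2 p.2) := by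
  rw [pvBucketSorted, PySem.List.foldl_append_eq_flatMap, List.nil_append,
    sorted2_eq_buckets (fun p => pvK1 p.2) (fun p => pvK2 p.2) _ (by decide) pvK1_mem en]

-- ===== VERDICT (by name: the statement is the Claim_ definition above) =====
theorem format_grouped_line_spec : Claim_equal_format_grouped_line := by
  intro title rs _
  unfold Spec_format_grouped_line format_grouped_line format_grouped_line_alt
  by_cases hrs : rs = []
  · simp [hrs]
  · rw [if_neg hrs, if_neg hrs]
    simp only [ordered_eq_sorted2, descFind_eq_loop, sorted2_filter,
      PySem.List.foldl_append_singleton_eq_map, List.nil_append]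
    by_cases hc : (PySem.List.enumerate rs 0).filter
        (fun p => decide (p.1 ≠ ((PySem.List.sorted2 (PySem.List.enumerate rs 0)
          (fun p => pvK1 p.2) (fun p => pvK2 p.2)).headD (0, [])).1)) = []
    · have h2 := sorted2_filter (PySem.List.enumerate rs 0) (fun p => pvK1 p.2) (fun p => pvK2 p.2)
        (fun p => decide (p.1 ≠ ((PySem.List.sorted2 (PySem.List.enumerate rs 0)
          (fun p => pvK1 p.2) (fun p => pvK2 p.2)).headD (0, [])).1))
      rw [hc] at h2
      have h3 : (PySem.List.sorted2 (PySem.List.enumerate rs 0) (fun p => pvK1 p.2)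
          (fun p => pvK2 p.2)).filter
          (fun p => decide (p.1 ≠ ((PySem.List.sorted2 (PySem.List.enumerate rs 0)
            (fun p => pvK1 p.2) (fun p => pvK2 p.2)).headD (0, [])).1)) = [] :=
        h2.symm.trans (by rfl)
      rw [if_pos hc, h3]
      simp
    · rw [if_neg hc]
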